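-- pv_equiv track=rewrite | github.com/ZongyuWu97/LeetCode | OA/LinkedInoa.py | linkedIn1
-- ===== SOURCE A (Python) =====
-- def linkedIn1(numCalls, alertThreshold, precedingMinutes):
--     n = len(numCalls)
--     if n <= precedingMinutes:
--         return 0
--     thres = alertThreshold * precedingMinutes
--     curr = sum(numCalls[:precedingMinutes])
--     res = int(curr > thres)
--     l = 0
--     for r in range(precedingMinutes, n):
--         curr += numCalls[r] - numCalls[l]
--         l += 1
--         res += int(curr > thres)
--     return res
-- ===== SOURCE B (Python) =====
-- def linkedIn1(numCalls, alertThreshold, precedingMinutes):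
--     n = len(numCalls)
--     if n <= precedingMinutes:
--         return 0
--     thres = alertThreshold * precedingMinutes
--     prefix = [0]
--     for x in numCalls:
--         prefix.append(prefix[-1] + x)
--     res = 0
--     for l in range(n - precedingMinutes + 1):
--         if prefix[l + precedingMinutes] - prefix[l] > thres:
--             res += 1
--     return res
-- ===== Notes on version B (the rewrite author's own statement) =====
-- stated objective: alternative
-- what changed: Replaced the maintained sliding running sum (curr updated with the entering/leaving element) by a precomputed prefix-sum table, with each window sum read off as a difference of two table entries in an independent pass over window starts.
import Mathlib
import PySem

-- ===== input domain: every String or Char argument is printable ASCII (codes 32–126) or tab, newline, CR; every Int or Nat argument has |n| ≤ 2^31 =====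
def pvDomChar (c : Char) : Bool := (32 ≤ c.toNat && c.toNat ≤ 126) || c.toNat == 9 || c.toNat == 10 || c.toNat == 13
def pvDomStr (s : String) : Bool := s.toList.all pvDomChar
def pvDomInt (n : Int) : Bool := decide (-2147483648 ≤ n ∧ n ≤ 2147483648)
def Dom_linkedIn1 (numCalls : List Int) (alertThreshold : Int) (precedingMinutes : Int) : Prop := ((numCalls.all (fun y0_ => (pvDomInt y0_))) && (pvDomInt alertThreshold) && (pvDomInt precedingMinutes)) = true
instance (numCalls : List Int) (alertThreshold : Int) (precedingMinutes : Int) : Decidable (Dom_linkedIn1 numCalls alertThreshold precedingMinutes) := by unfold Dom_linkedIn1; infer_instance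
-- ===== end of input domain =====

-- B replaces A's maintained sliding running sum with a precomputed prefix-sum table read as differences (alternative decomposition, same O(n) cost).


-- ===== PORT A =====
def linkedIn1 (numCalls : List Int) (alertThreshold : Int) (precedingMinutes : Int) : Int :=
  let n : Int := numCalls.length
  if n ≤ precedingMinutes then 0
  else
    let thres := alertThreshold * precedingMinutes
    let curr0 := (PySem.List.slice numCalls none (some precedingMinutes)).sum
    let res0 : Int := if curr0 > thres then 1 else 0
    let st := (PySem.List.pyRange precedingMinutes n 1).foldl
      (fun (st : Int × Int × Int) r =>
        let curr := st.1 + PySem.List.pyGetD numCalls r 0 - PySem.List.pyGetD numCalls st.2.1 0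
        (curr, st.2.1 + 1, st.2.2 + (if curr > thres then (1 : Int) else 0)))
      (curr0, 0, res0)
    st.2.2

-- ===== PORT B =====
def linkedIn1_alt (numCalls : List Int) (alertThreshold : Int) (precedingMinutes : Int) : Int :=
  let n : Int := numCalls.length
  if n ≤ precedingMinutes then 0
  else
    let thres := alertThreshold * precedingMinutes
    let pre := numCalls.foldl (fun acc x => acc ++ [PySem.List.pyGetD acc (-1) 0 + x]) [0]
    (PySem.List.pyRange 0 (n - precedingMinutes + 1) 1).foldl
      (fun res l =>
        if PySem.List.pyGetD pre (l + precedingMinutes) 0 - PySem.List.pyGetD pre l 0 > thres then res + 1 else res)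
      0

-- ===== PRECONDITION & SPEC =====
-- Pre_ excludes negative precedingMinutes, on which A always raises IndexError (its left pointer runs past the end of numCalls).
def Pre_linkedIn1 (numCalls : List Int) (alertThreshold : Int) (precedingMinutes : Int) : Prop :=
  0 ≤ precedingMinutes
instance (numCalls : List Int) (alertThreshold : Int) (precedingMinutes : Int) : Decidable (Pre_linkedIn1 numCalls alertThreshold precedingMinutes) := by unfold Pre_linkedIn1; infer_instance
def pvWitness_linkedIn1 : List Int × Int × Int := ([8, 2, 4, 1], 3, 2)
def Spec_linkedIn1 (numCalls : List Int) (alertThreshold : Int) (precedingMinutes : Int) (out : Int) : Prop := out = linkedIn1_alt numCalls alertThreshold precedingMinutes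
instance (numCalls : List Int) (alertThreshold : Int) (precedingMinutes : Int) (out : Int) : Decidable (Spec_linkedIn1 numCalls alertThreshold precedingMinutes out) := by unfold Spec_linkedIn1; infer_instance

-- ===== CLAIM (what is proved, stated in full; the proofs are below) =====
def Claim_equal_linkedIn1 : Prop := ∀ (numCalls : List Int) (alertThreshold : Int) (precedingMinutes : Int), Dom_linkedIn1 numCalls alertThreshold precedingMinutes → Pre_linkedIn1 numCalls alertThreshold precedingMinutes → Spec_linkedIn1 numCalls alertThreshold precedingMinutes (linkedIn1 numCalls alertThreshold precedingMinutes)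

-- ===== LEMMAS AND PROOFS =====

-- sum of the window of length q starting at k, as a difference of prefix sums
def pvW (a : List Int) (q k : Nat) : Int := (a.take (k + q)).sum - (a.take k).sum

theorem pvW_zero (a : List Int) (q : Nat) : pvW a q 0 = (a.take q).sum := by
  simp [pvW]

theorem pvW_succ (a : List Int) (q m : Nat) (h : m + 1 + q ≤ a.length) :
    pvW a q (m + 1) = pvW a q m + a[m + q]'(by omega) - a[m]'(by omega) := by
  unfold pvW
  have h1 : (a.take (m + q + 1)).sum = (a.take (m + q)).sum + a[m + q]'(by omega) :=
    List.sum_take_succ a (m + q) (by omega)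
  have h2 : (a.take (m + 1)).sum = (a.take m).sum + a[m]'(by omega) :=
    List.sum_take_succ a m (by omega)
  have e : m + 1 + q = m + q + 1 := by omega
  rw [e, h1, h2]; ring

-- invariant of A's sliding-window loop
theorem loopA (a : List Int) (q : Nat) (thres i0 : Int) (m : Nat) (hm : m + q ≤ a.length) :
    (((List.range m).map (fun k : Nat => ((q : Int) + (k : Int)))).foldl
      (fun (st : Int × Int × Int) r =>
        (st.1 + PySem.List.pyGetD a r 0 - PySem.List.pyGetD a st.2.1 0, st.2.1 + 1,
         st.2.2 + (if st.1 + PySem.List.pyGetD a r 0 - PySem.List.pyGetD a st.2.1 0 > thres then (1 : Int) else 0)))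
      (pvW a q 0, 0, i0))
    = (pvW a q m, (m : Int),
       i0 + ((List.range m).map (fun k => if pvW a q (k + 1) > thres then (1 : Int) else 0)).sum) := by
  induction m with
  | zero => simp
  | succ m ih =>
    rw [List.range_succ, List.map_append, List.foldl_append, ih (by omega)]
    simp only [List.map_cons, List.map_nil, List.foldl_cons, List.foldl_nil]
    have hidx : ((q : Int) + (m : Int)) = ((m + q : Nat) : Int) := by push_cast; ring
    have g1 : PySem.List.pyGetD a ((q : Int) + (m : Int)) 0 = a[m + q]'(by omega) := by
      rw [hidx, PySem.List.pyGetD_natCast]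
      exact List.getD_eq_getElem a 0 (by omega)
    have g2 : PySem.List.pyGetD a ((m : Nat) : Int) 0 = a[m]'(by omega) := by
      rw [PySem.List.pyGetD_natCast]
      exact List.getD_eq_getElem a 0 (by omega)
    have hw := pvW_succ a q m (by omega)
    simp only [g1, g2, List.map_append, List.map_cons, List.map_nil, List.sum_append,
      List.sum_cons, List.sum_nil]
    refine Prod.ext ?_ (Prod.ext ?_ ?_)
    · simp [hw]
    · push_cast; ring
    · simp [hw]; ring

-- B's prefix-list construction, characterized
theorem buildP (xs : List Int) : ∀ (acc : List Int) (L : Int), acc ≠ [] →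
    PySem.List.pyGetD acc (-1) 0 = L →
    xs.foldl (fun a x => a ++ [PySem.List.pyGetD a (-1) 0 + x]) acc
    = acc ++ (List.range xs.length).map (fun i => L + (xs.take (i + 1)).sum) := by
  induction xs with
  | nil => intro acc L h hL; simp
  | cons x xs ih =>
    intro acc L h hL
    simp only [List.foldl_cons, List.length_cons]
    rw [ih (acc ++ [PySem.List.pyGetD acc (-1) 0 + x]) (L + x) (by simp)
      (by rw [PySem.List.pyGetD_neg_one_append_singleton, hL])]
    rw [List.range_succ_eq_map]
    simp only [List.map_cons, List.map_map, List.append_assoc, List.cons_append, List.nil_append,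
      hL]
    congr 2
    · simp
    · apply List.map_congr_left
      intro i _
      simp [Function.comp, List.sum_cons]
      ring

-- reading the prefix table at a Nat index
theorem getP (a : List Int) (j : Nat) (hj : j ≤ a.length) :
    PySem.List.pyGetD
      ((0 : Int) :: (List.range a.length).map (fun i => (0 : Int) + (a.take (i + 1)).sum)) (j : Int) 0
    = (a.take j).sum := by
  rw [PySem.List.pyGetD_natCast]
  cases j with
  | zero => simp
  | succ j =>
    simp only [List.getD_cons_succ]
    rw [List.getD_eq_getElem _ _ (by simpa using hj)]
    simp

-- ===== VERDICT (by name: the statement is the Claim_ definition above) =====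
theorem linkedIn1_spec : Claim_equal_linkedIn1 := by
  intro a t p _ hp
  unfold Spec_linkedIn1 linkedIn1 linkedIn1_alt
  by_cases hnp : (a.length : Int) ≤ p
  · simp [hnp]
  · simp only [hnp, if_false]
    have hq : ((p.toNat : Int)) = p := Int.toNat_of_nonneg hp
    set q : Nat := p.toNat with hqdef
    have hqlt : q < a.length := by omega
    set m : Nat := a.length - q with hmdef
    -- A side
    have hA1 : ((a.length : Int) - p).toNat = m := by omega
    have hcurr0 : (PySem.List.slice a none (some p)).sum = pvW a q 0 := by
      rw [PySem.List.slice_to a hp, pvW_zero]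
    rw [PySem.List.pyRange_one p (a.length : Int), hA1, hcurr0, ← hq]
    rw [loopA a q (t * (q : Int)) _ m (by omega)]
    -- B side
    have hpre : a.foldl (fun acc x => acc ++ [PySem.List.pyGetD acc (-1) 0 + x]) [0]
        = (0 : Int) :: (List.range a.length).map (fun i => (0 : Int) + (a.take (i + 1)).sum) := by
      rw [buildP a [0] 0 (by simp) (by rfl)]
      simp
    rw [hpre]
    have hB1 : ((a.length : Int) - (q : Int) + 1 - 0).toNat = m + 1 := by omega
    rw [PySem.List.pyRange_one 0 ((a.length : Int) - (q : Int) + 1), hB1]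
    rw [List.foldl_map]
    have hfun : ∀ (res : Int) (k : Nat), k < m + 1 →
        (if PySem.List.pyGetD ((0 : Int) :: (List.range a.length).map (fun i => (0 : Int) + (a.take (i + 1)).sum)) ((0 : Int) + (k : Int) + (q : Int)) 0
            - PySem.List.pyGetD ((0 : Int) :: (List.range a.length).map (fun i => (0 : Int) + (a.take (i + 1)).sum)) ((0 : Int) + (k : Int)) 0 > t * (q : Int)
         then res + 1 else res)
        = res + (if pvW a q k > t * (q : Int) then (1 : Int) else 0) := by
      intro res k hk
      have e1 : (0 : Int) + (k : Int) + (q : Int) = ((k + q : Nat) : Int) := by push_cast; omega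
      have e2 : (0 : Int) + (k : Int) = ((k : Nat) : Int) := by ring
      rw [e1, e2, getP a (k + q) (by omega), getP a k (by omega)]
      unfold pvW
      split <;> ring
    rw [PySem.List.foldl_congr_mem _ _ (fun res k => res + (if pvW a q k > t * (q : Int) then (1 : Int) else 0)) 0
      (fun res k hk => hfun res k (by simpa using hk))]
    rw [PySem.List.foldl_add]
    rw [List.range_succ_eq_map]
    simp only [List.map_cons, List.map_map, List.sum_cons, Function.comp_def,
      Nat.succ_eq_add_one]
    rw [pvW_zero]
    ring
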